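-- pv_equiv track=rewrite | github.com/queelius/computational-explorations | src/ap_attacks.py | _would_create_kap
-- ===== SOURCE A (Python) =====
-- from typing import Dict, FrozenSet, List, Optional, Set, Tuple
--
-- def _would_create_kap(x: int, A_set: Set[int], k: int) -> bool:
--     """Check if adding x to A_set creates a k-term AP."""
--     # Enumerate all APs through x whose other k-1 members lie in A_set.
--     # An AP containing x has the form {x - j*d, ..., x, ..., x + (k-1-j)*d}
--     # for some d != 0 and position j in 0..k-1.
--     # Equivalently, start = x - j*d, common difference d, for j = 0..k-1.
--     #
--     # Optimisation: for each pair of existing elements a, b with a < b,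
--     # if they are compatible with an AP through x, check it.  But that
--     # is still O(|A|^2).  For the greedy, a simpler approach: for each
--     # element a in A_set, consider d = x - a (so x = a + d), and check
--     # every AP of length k with that common difference that contains both
--     # x and a.
--
--     for a in A_set:
--         d = x - a  # a and x are consecutive in some AP with this diff
--         if d == 0:
--             continue
--         # x = a + d.  An AP with common difference d containing x at
--         # position j has start = x - j*d.  For this AP to also contain a,
--         # a = start + m*d for some m, giving m = j - 1 (since a = x - d).
--         # More generally, for any non-zero d, iterate over all possible
--         # start positions that place x somewhere in a length-k AP.
--         for j in range(k):
--             start = x - j * d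
--             # Check if all k elements of this AP are in A_set ∪ {x}
--             all_in = True
--             for m in range(k):
--                 elem = start + m * d
--                 if elem == x:
--                     continue
--                 if elem not in A_set:
--                     all_in = False
--                     break
--             if all_in:
--                 return True
--     return False
-- ===== SOURCE B (Python) =====
-- def _would_create_kap(x, A_set, k):
--     """Check if adding x to A_set creates a k-term AP.
--
--     For each candidate difference d = x - a, count the run of consecutive
--     AP elements below x that are already present, then check that the
--     remaining k-1-left elements above x are present too.
--     """
--     if k <= 0:
--         return False
--     n = k - 1
--     for a in A_set:
--         d = x - a
--         if d == 0:
--             continue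
--         left = 0
--         cur = x
--         while left < n and (cur - d) in A_set:
--             cur -= d
--             left += 1
--         ok = True
--         cur = x
--         for _ in range(n - left):
--             cur += d
--             if cur not in A_set:
--                 ok = False
--                 break
--         if ok:
--             return True
--     return False
-- ===== Notes on version B (the rewrite author's own statement) =====
-- stated objective: faster
-- what changed: Instead of testing all k window positions for each difference d (each window rechecked element by element), B counts the run of consecutive present elements below x once and then verifies only the remaining needed elements above x, turning the per-difference work from O(k^2) into O(k).
import Mathlib
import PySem

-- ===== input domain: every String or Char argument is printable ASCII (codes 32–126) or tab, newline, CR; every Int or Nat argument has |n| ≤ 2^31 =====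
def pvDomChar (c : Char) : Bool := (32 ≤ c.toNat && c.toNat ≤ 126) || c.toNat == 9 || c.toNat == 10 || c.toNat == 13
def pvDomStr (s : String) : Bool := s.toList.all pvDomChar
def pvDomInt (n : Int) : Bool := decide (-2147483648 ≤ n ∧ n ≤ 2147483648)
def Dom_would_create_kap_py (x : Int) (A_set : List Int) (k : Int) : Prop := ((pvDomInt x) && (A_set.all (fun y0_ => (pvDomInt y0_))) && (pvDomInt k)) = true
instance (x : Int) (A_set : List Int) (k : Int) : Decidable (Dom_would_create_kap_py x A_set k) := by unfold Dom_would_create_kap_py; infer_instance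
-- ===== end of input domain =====

-- B replaces A's scan of all k window positions (each rechecked in O(k)) by one
-- run count below x plus one check of the remaining elements above x: O(|A|*k) vs O(|A|*k^2).

-- ===== PORT A =====
def would_create_kap_py (x : Int) (A_set : List Int) (k : Int) : Bool :=
  A_set.any (fun a =>
    let d := x - a
    if d = 0 then false
    else
      (PySem.List.pyRange 0 k 1).any (fun j =>
        let start := x - j * d
        (PySem.List.pyRange 0 k 1).all (fun m =>
          let elem := start + m * d
          elem == x || A_set.contains elem)))

-- ===== PORT B =====
-- length of the run x-d, x-2d, … present in A (capped by the fuel n = k-1)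
def pvLeftRun (A : List Int) (x d : Int) : Nat → Nat
  | 0 => 0
  | n + 1 => if A.contains (x - d) then pvLeftRun A (x - d) d n + 1 else 0

-- are x+d, x+2d, …, x+t*d all present in A?
def pvUpChain (A : List Int) (x d : Int) : Nat → Bool
  | 0 => true
  | t + 1 => A.contains (x + d) && pvUpChain A (x + d) d t

def would_create_kap_py_alt (x : Int) (A_set : List Int) (k : Int) : Bool :=
  if k ≤ 0 then false
  else
    let n := (k - 1).toNat
    A_set.any (fun a =>
      let d := x - a
      if d = 0 then false
      else pvUpChain A_set x d (n - pvLeftRun A_set x d n))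

-- ===== PRECONDITION & SPEC =====
def Spec_would_create_kap_py (x : Int) (A_set : List Int) (k : Int) (out : Bool) : Prop := out = would_create_kap_py_alt x A_set k
instance (x : Int) (A_set : List Int) (k : Int) (out : Bool) : Decidable (Spec_would_create_kap_py x A_set k out) := by unfold Spec_would_create_kap_py; infer_instance

-- ===== CLAIM (what is proved, stated in full; the proofs are below) =====
def Claim_equal_would_create_kap_py : Prop := ∀ (x : Int) (A_set : List Int) (k : Int), Dom_would_create_kap_py x A_set k → Spec_would_create_kap_py x A_set k (would_create_kap_py x A_set k)

-- ===== LEMMAS AND PROOFS =====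

-- "x with s*d subtracted is present for all 1 ≤ s ≤ t"
def pvDownP (A : List Int) (x d t : Int) : Prop :=
  ∀ s : Int, 1 ≤ s → s ≤ t → A.contains (x - s * d) = true

def pvUpP (A : List Int) (x d t : Int) : Prop :=
  ∀ s : Int, 1 ≤ s → s ≤ t → A.contains (x + s * d) = true

theorem pvUpChain_iff (A : List Int) (d : Int) (t : Nat) :
    ∀ x : Int, pvUpChain A x d t = true ↔ pvUpP A x d t := by
  induction t with
  | zero => intro x; simp [pvUpChain, pvUpP]; intro s h1 h2; omega
  | succ m ih =>
    intro x
    simp only [pvUpChain, Bool.and_eq_true, ih]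
    constructor
    · rintro ⟨hc, hup⟩ s h1 h2
      rcases eq_or_lt_of_le h1 with h | h
      · have e : x + s * d = x + d := by rw [← h]; ring
        rw [e]; exact hc
      · have := hup (s - 1) (by omega) (by omega)
        have e : x + d + (s - 1) * d = x + s * d := by ring
        rwa [e] at this
    · intro h
      refine ⟨?_, ?_⟩
      · have := h 1 le_rfl (by push_cast; omega)
        simpa using this
      · intro s h1 h2
        have := h (s + 1) (by omega) (by push_cast; omega)
        have e2 : x + (s + 1) * d = x + d + s * d := by ring
        rwa [e2] at this

theorem pvLeftRun_spec (A : List Int) (d : Int) (n : Nat) :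
    ∀ x : Int,
      pvLeftRun A x d n ≤ n ∧
      pvDownP A x d (pvLeftRun A x d n) ∧
      (pvLeftRun A x d n < n → A.contains (x - ((pvLeftRun A x d n : Int) + 1) * d) = false) := by
  induction n with
  | zero =>
    intro x
    refine ⟨le_rfl, ?_, by omega⟩
    intro s h1 h2; simp [pvLeftRun] at h2; omega
  | succ m ih =>
    intro x
    by_cases hc : A.contains (x - d) = true
    · obtain ⟨hle, hdown, hbrk⟩ := ih (x - d)
      have hdef : pvLeftRun A x d (m + 1) = pvLeftRun A (x - d) d m + 1 := by
        simp only [pvLeftRun]; rw [if_pos hc]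
      refine ⟨by omega, ?_, ?_⟩
      · intro s h1 h2
        rcases eq_or_lt_of_le h1 with h | h
        · have e : x - s * d = x - d := by rw [← h]; ring
          rw [e]; exact hc
        · rw [hdef] at h2
          have := hdown (s - 1) (by omega) (by push_cast at h2 ⊢; omega)
          have e : x - d - (s - 1) * d = x - s * d := by ring
          rwa [e] at this
      · intro hlt
        rw [hdef] at hlt ⊢
        have := hbrk (by omega)
        have e : x - d - ((pvLeftRun A (x - d) d m : Int) + 1) * d
            = x - ((pvLeftRun A (x - d) d m + 1 : Nat) + 1) * d := by push_cast; ring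
        rwa [e] at this
    · have hdef : pvLeftRun A x d (m + 1) = 0 := by
        simp only [pvLeftRun]; rw [if_neg hc]
      refine ⟨by omega, ?_, ?_⟩
      · intro s h1 h2; rw [hdef] at h2; omega
      · intro _
        rw [hdef]
        have e : x - (((0 : Nat) : Int) + 1) * d = x - d := by push_cast; ring
        rw [e]
        exact eq_false_of_ne_true hc

-- A's window at position j is fully present iff run conditions hold on both sides
theorem pvWindow_iff (A : List Int) (x d k j : Int) (hd : d ≠ 0)
    (hj0 : 0 ≤ j) (hjk : j < k) :
    (∀ m : Int, 0 ≤ m → m < k → (x - j * d + m * d = x ∨ A.contains (x - j * d + m * d) = true)) ↔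
      (pvDownP A x d j ∧ pvUpP A x d (k - 1 - j)) := by
  constructor
  · intro h
    constructor
    · intro s h1 h2
      have hm := h (j - s) (by omega) (by omega)
      have e : x - j * d + (j - s) * d = x - s * d := by ring
      rw [e] at hm
      rcases hm with hm | hm
      · exfalso
        have : s * d = 0 := by omega
        rcases mul_eq_zero.mp this with h' | h' <;> [omega; exact hd h']
      · exact hm
    · intro s h1 h2
      have hm := h (j + s) (by omega) (by omega)
      have e : x - j * d + (j + s) * d = x + s * d := by ring
      rw [e] at hm
      rcases hm with hm | hm
      · exfalso
        have : s * d = 0 := by omega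
        rcases mul_eq_zero.mp this with h' | h' <;> [omega; exact hd h']
      · exact hm
  · rintro ⟨hdown, hup⟩ m hm0 hmk
    rcases lt_trichotomy m j with h | h | h
    · right
      have := hdown (j - m) (by omega) (by omega)
      have e : x - (j - m) * d = x - j * d + m * d := by ring
      rwa [e] at this
    · left; rw [h]; ring
    · right
      have := hup (m - j) (by omega) (by omega)
      have e : x + (m - j) * d = x - j * d + m * d := by ring
      rwa [e] at this

theorem pvUpP_mono (A : List Int) (x d : Int) {t t' : Int} (h : t' ≤ t) :
    pvUpP A x d t → pvUpP A x d t' := by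
  intro hu s h1 h2; exact hu s h1 (le_trans h2 h)

-- the key per-difference equivalence
theorem pvInner_eq (A : List Int) (x d k : Int) (hd : d ≠ 0) (hk : 1 ≤ k) :
    ((PySem.List.pyRange 0 k 1).any (fun j =>
        (PySem.List.pyRange 0 k 1).all (fun m =>
          (x - j * d + m * d == x) || A.contains (x - j * d + m * d))))
      = pvUpChain A x d ((k - 1).toNat - pvLeftRun A x d (k - 1).toNat) := by
  set N : Nat := (k - 1).toNat with hN
  have hNk : (N : Int) = k - 1 := by omega
  set L : Nat := pvLeftRun A x d N with hL
  obtain ⟨hLle, hLdown, hLbrk⟩ := pvLeftRun_spec A d N x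
  rw [← hL] at hLle hLdown hLbrk
  apply Bool.eq_iff_iff.mpr
  rw [pvUpChain_iff]
  have hcast : ((N - L : Nat) : Int) = (N : Int) - (L : Int) := by omega
  simp only [List.any_eq_true, List.all_eq_true, PySem.List.mem_pyRange_one,
    Bool.or_eq_true, beq_iff_eq]
  constructor
  · rintro ⟨j, ⟨hj0, hjk⟩, hall⟩
    have hwin : pvDownP A x d j ∧ pvUpP A x d (k - 1 - j) := by
      rw [← pvWindow_iff A x d k j hd hj0 hjk]
      intro m hm0 hmk; exact hall m ⟨hm0, hmk⟩
    obtain ⟨hdown, hup⟩ := hwin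
    -- j ≤ L : otherwise the run would have broken below position j
    have hjL : j ≤ (L : Int) := by
      by_contra hgt
      rw [Int.not_le] at hgt
      have hLltN : L < N := by omega
      have hbad := hLbrk hLltN
      have := hdown ((L : Int) + 1) (by omega) (by omega)
      rw [this] at hbad; simp at hbad
    rw [hcast]
    exact pvUpP_mono A x d (by omega) hup
  · intro hup
    refine ⟨(L : Int), ⟨by omega, by omega⟩, ?_⟩
    intro m hm
    have := (pvWindow_iff A x d k (L : Int) hd (by omega) (by omega)).mpr
      ⟨hLdown, by rw [hcast] at hup; exact pvUpP_mono A x d (by omega) hup⟩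
    exact this m hm.1 hm.2

-- ===== VERDICT (by name: the statement is the Claim_ definition above) =====
theorem would_create_kap_py_spec : Claim_equal_would_create_kap_py := by
  intro x A_set k _
  unfold Spec_would_create_kap_py would_create_kap_py would_create_kap_py_alt
  by_cases hk : k ≤ 0
  · rw [PySem.List.pyRange_one_eq_nil (by omega)]
    simp [hk]
  · simp only [hk, if_false]
    rw [Int.not_le] at hk
    congr 1
    funext a
    by_cases hd : x - a = 0
    · simp [hd]
    · simp only [hd, if_false]
      exact pvInner_eq A_set x (x - a) k hd (by omega)
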